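-- pv_equiv track=rewrite | github.com/m1sterzer0/codejams | 2010/Qual/C.py | solve
-- ===== SOURCE A (Python) =====
-- def rcSolve(n,gs,k,idx) :
--     riders = 0
--     for i in range(n) :
--         nextidx = (idx+i) % n
--         if riders + gs[nextidx] <= k : riders += gs[nextidx]
--         else                         : return riders,nextidx
--     return riders,idx
--
-- def solve(inp) :
--     (r,k,n,gs) = inp
--     sb = [ None ] * n
--     rr,riders,idx = 0,0,0
--     remainderFlag = False
--     while rr < r :
--         if remainderFlag or sb[idx] is None :
--              sb[idx] = (rr,riders)
--              rr += 1
--              numRiders,idx = rcSolve(n,gs,k,idx)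
--              riders += numRiders
--         else :
--             numRidesInCycle  = rr - sb[idx][0]
--             numRidersInCycle = riders - sb[idx][1]
--             numCycles = (r - rr) // numRidesInCycle
--             rr += numCycles * numRidesInCycle
--             riders += numCycles * numRidersInCycle
--             remainderFlag = True
--     return "%d" % riders
-- ===== SOURCE B (Python) =====
-- def solve(inp):
--     (r, k, n, gs) = inp
--     if r <= 0:
--         return "0"
--     # prefix sums of the doubled group list: P[j] = gs[0 % n] + ... + gs[(j-1) % n]
--     P = [0]
--     for j in range(2 * n):
--         P.append(P[-1] + gs[j % n])
--     # sparse table for range-maximum over Q = P[1:]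
--     jmp = [P[1:]]
--     off = 1
--     while len(jmp[-1]) > off:
--         prev = jmp[-1]
--         jmp.append([max(prev[i], prev[i + off]) for i in range(len(prev) - off)])
--         off *= 2
--     # per-start (riders, next start): first j in [s, s+n) with P[j+1] > k + P[s],
--     # found by binary descent over the sparse table in O(log n)
--     table = []
--     for s in range(n):
--         thr = k + P[s]
--         pos = s
--         w = 1 << (len(jmp) - 1)
--         for l in range(len(jmp) - 1, -1, -1):
--             if pos + w <= s + n and jmp[l][pos] <= thr:
--                 pos += w
--             w //= 2
--         if pos < s + n:
--             table.append((P[pos] - P[s], pos % n))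
--         else:
--             table.append((P[s + n] - P[s], s))
--     # simulate the rides, memoising first-visit (ride#, riders) per start to jump whole cycles
--     sb = [None] * n
--     rr, riders, idx = 0, 0, 0
--     remainderFlag = False
--     while rr < r:
--         if remainderFlag or sb[idx] is None:
--             sb[idx] = (rr, riders)
--             rr += 1
--             numRiders, idx = table[idx]
--             riders += numRiders
--         else:
--             cycleRides = rr - sb[idx][0]
--             cycleRiders = riders - sb[idx][1]
--             numCycles = (r - rr) // cycleRides
--             rr += numCycles * cycleRides
--             riders += numCycles * cycleRiders
--             remainderFlag = True
--     return "%d" % riders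
-- ===== Notes on version B (the rewrite author's own statement) =====
-- stated objective: alternative
-- what changed: B replaces A's per-ride linear group scan by prefix sums of the doubled group list plus a sparse-table range-maximum structure, computing every start's (riders, next start) up front with an O(log n) binary descent, and then runs the cycle-jumping ride simulation on the precomputed table.
-- outside the precondition, e.g. on solve((1, 3, 2, [5])): A returns '0', B raises IndexError
import Mathlib
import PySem

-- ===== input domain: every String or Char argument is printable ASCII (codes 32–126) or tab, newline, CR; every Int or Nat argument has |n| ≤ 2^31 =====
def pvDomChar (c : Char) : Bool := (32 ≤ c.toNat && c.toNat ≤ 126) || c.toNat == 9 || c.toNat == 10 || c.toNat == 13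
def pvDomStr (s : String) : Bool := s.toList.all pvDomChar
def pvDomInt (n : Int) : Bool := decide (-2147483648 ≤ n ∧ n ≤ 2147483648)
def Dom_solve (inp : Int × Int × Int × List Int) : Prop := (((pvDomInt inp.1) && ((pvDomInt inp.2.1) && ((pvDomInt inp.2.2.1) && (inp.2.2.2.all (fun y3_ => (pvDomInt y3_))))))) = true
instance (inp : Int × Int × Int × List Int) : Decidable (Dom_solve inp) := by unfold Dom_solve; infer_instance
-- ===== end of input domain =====

-- B precomputes every start's (riders, next) with prefix sums + a sparse-table range-maximum
-- binary descent instead of A's per-ride linear scan; the cycle-jumping simulation then reads the table.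

-- ===== PORT A =====
def rcLoop (gs : List Int) (k idx n : Int) : List Int → Int → Option (Int × Int)
  | [], riders => some (riders, idx)
  | i :: is, riders =>
    let nextidx := PySem.Int.mod (idx + i) n
    match PySem.List.pyGet? gs nextidx with
    | none => none
    | some g =>
      if riders + g ≤ k then rcLoop gs k idx n is (riders + g)
      else some (riders, nextidx)

def rcSolve (n : Int) (gs : List Int) (k idx : Int) : Option (Int × Int) :=
  rcLoop gs k idx n (PySem.List.pyRange 0 n 1) 0

-- while loop ported with fuel (r.toNat + 2 always exceeds the iteration count: each iteration
-- either increments rr, bounded by the guard rr < r, or — at most once — sets remainderFlag)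
def solveLoopA (r k n : Int) (gs : List Int) :
    Nat → List (Option (Int × Int)) → Int → Int → Int → Bool → Option Int
  | 0, _, _, _, _, _ => none
  | fuel+1, sb, rr, riders, idx, remainderFlag =>
    if rr < r then
      match PySem.List.pyGet? sb idx with
      | none => none
      | some entry =>
        if remainderFlag || entry.isNone then
          match rcSolve n gs k idx with
          | none => none
          | some res =>
            solveLoopA r k n gs fuel (PySem.List.pySetD sb idx (some (rr, riders)))
              (rr + 1) (riders + res.1) res.2 remainderFlag
        else
          match entry with
          | none => none
          | some e0 =>
            let numRidesInCycle := rr - e0.1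
            let numRidersInCycle := riders - e0.2
            match PySem.Int.floordiv? (r - rr) numRidesInCycle with
            | none => none
            | some numCycles =>
              solveLoopA r k n gs fuel sb (rr + numCycles * numRidesInCycle)
                (riders + numCycles * numRidersInCycle) idx true
    else some riders

def solve (inp : Int × Int × Int × List Int) : String :=
  match solveLoopA inp.1 inp.2.1 inp.2.2.1 inp.2.2.2 (inp.1.toNat + 2)
      (List.replicate inp.2.2.1.toNat none) 0 0 0 false with
  | some riders => PySem.Int.toStr riders
  | none => ""

-- ===== PORT B =====
-- P.append(P[-1] + gs[j % n]) over j in range(2*n)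
def buildP (n : Int) (gs : List Int) : List Int → List Int → Option (List Int)
  | acc, [] => some acc
  | acc, j :: js =>
    match PySem.List.pyGet? gs (PySem.Int.mod j n) with
    | none => none
    | some g => buildP n gs (acc ++ [PySem.List.pyGetD acc (-1) 0 + g]) js

-- [max(prev[i], prev[i+off]) for i in range(len(prev)-off)]
def maxLevel (prev : List Int) (off : Nat) : List Int :=
  (List.range (prev.length - off)).map
    (fun i : ℕ => max (PySem.List.pyGetD prev (i : Int) 0) (PySem.List.pyGetD prev ((i : Int) + (off : Int)) 0))

-- while len(jmp[-1]) > off: jmp.append(...); off *= 2   (fuel 2n+2 exceeds the iteration count: off doubles)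
def buildJmp : Nat → List (List Int) → Nat → List (List Int)
  | 0, jmp, _ => jmp
  | fuel+1, jmp, off =>
    let prev := PySem.List.pyGetD jmp (-1) []
    if off < prev.length then
      buildJmp fuel (jmp ++ [maxLevel prev off]) (off * 2)
    else jmp

-- for l in range(len(jmp)-1, -1, -1): if pos + w <= s+n and jmp[l][pos] <= thr: pos += w; w //= 2
def descendLoop (jmp : List (List Int)) (bound thr : Int) : List Int → Int → Int → Int
  | [], pos, _ => pos
  | l :: ls, pos, w =>
    let pos' := if pos + w ≤ bound ∧ PySem.List.pyGetD (PySem.List.pyGetD jmp l []) pos 0 ≤ thr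
      then pos + w else pos
    descendLoop jmp bound thr ls pos' (PySem.Int.floordiv w 2)

def buildTable (n k : Int) (P : List Int) (jmp : List (List Int)) : List (Int × Int) :=
  (PySem.List.pyRange 0 n 1).foldl (fun table s =>
    let thr := k + PySem.List.pyGetD P s 0
    let pos := descendLoop jmp (s + n) thr
      (PySem.List.pyRange ((jmp.length : Int) - 1) (-1) (-1)) s ((2 : Int) ^ (jmp.length - 1))
    let entry := if pos < s + n then
        (PySem.List.pyGetD P pos 0 - PySem.List.pyGetD P s 0, PySem.Int.mod pos n)
      else
        (PySem.List.pyGetD P (s + n) 0 - PySem.List.pyGetD P s 0, s)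
    table ++ [entry]) []

def solveLoopB (r : Int) (table : List (Int × Int)) :
    Nat → List (Option (Int × Int)) → Int → Int → Int → Bool → Option Int
  | 0, _, _, _, _, _ => none
  | fuel+1, sb, rr, riders, idx, remainderFlag =>
    if rr < r then
      match PySem.List.pyGet? sb idx with
      | none => none
      | some entry =>
        if remainderFlag || entry.isNone then
          match PySem.List.pyGet? table idx with
          | none => none
          | some res =>
            solveLoopB r table fuel (PySem.List.pySetD sb idx (some (rr, riders)))
              (rr + 1) (riders + res.1) res.2 remainderFlag
        else
          match entry with
          | none => none
          | some e0 =>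
            let cycleRides := rr - e0.1
            let cycleRiders := riders - e0.2
            match PySem.Int.floordiv? (r - rr) cycleRides with
            | none => none
            | some numCycles =>
              solveLoopB r table fuel sb (rr + numCycles * cycleRides)
                (riders + numCycles * cycleRiders) idx true
    else some riders

def solve_alt (inp : Int × Int × Int × List Int) : String :=
  if inp.1 ≤ 0 then "0" else
  match buildP inp.2.2.1 inp.2.2.2 [0] (PySem.List.pyRange 0 (2 * inp.2.2.1) 1) with
  | none => ""
  | some P =>
    let jmp := buildJmp (2 * inp.2.2.1.toNat + 2) [PySem.List.slice P (some 1) none] 1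
    let table := buildTable inp.2.2.1 inp.2.1 P jmp
    match solveLoopB inp.1 table (inp.1.toNat + 2) (List.replicate inp.2.2.1.toNat none) 0 0 0 false with
    | some riders => PySem.Int.toStr riders
    | none => ""

-- ===== PRECONDITION & SPEC =====
-- Pre_ excludes inputs with r > 0 where n < 1 (A raises IndexError on sb[0]) or n exceeds the
-- group-list length, where A raises IndexError unless every ride happens to stop early — a
-- malformed input, since n is the number of groups; B's eager prefix-sum build raises there.
def Pre_solve (inp : Int × Int × Int × List Int) : Prop :=
  inp.1 ≤ 0 ∨ (1 ≤ inp.2.2.1 ∧ inp.2.2.1 ≤ (inp.2.2.2.length : Int))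
instance (inp : Int × Int × Int × List Int) : Decidable (Pre_solve inp) := by unfold Pre_solve; infer_instance
def pvWitness_solve : (Int × Int × Int × List Int) := (6, 6, 4, [2, 3, 4, 1])
def Spec_solve (inp : Int × Int × Int × List Int) (out : String) : Prop := out = solve_alt inp
instance (inp : Int × Int × Int × List Int) (out : String) : Decidable (Spec_solve inp out) := by unfold Spec_solve; infer_instance

-- ===== CLAIM (what is proved, stated in full; the proofs are below) =====
def Claim_equal_solve : Prop := ∀ (inp : Int × Int × Int × List Int), Dom_solve inp → Pre_solve inp → Spec_solve inp (solve inp)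

-- ===== LEMMAS AND PROOFS =====

-- prefix sums of the doubled group list (proof-side reference)
def pfD (gs : List Int) (N : ℕ) : ℕ → Int
  | 0 => 0
  | j+1 => pfD gs N j + gs.getD (j % N) 0

def PlistD (gs : List Int) (N : ℕ) : List Int := (List.range (2*N+1)).map (pfD gs N)

-- level of width w of the sparse table: entry i bounds (and attains) the max of Qf i .. Qf (i+w-1)
def LSpecD (gs : List Int) (N w : ℕ) (lv : List Int) : Prop :=
  lv.length + w = 2*N + 1 ∧ ∀ i, i + w ≤ 2*N →
    (∀ t, t < w → pfD gs N (i+t+1) ≤ lv.getD i 0) ∧ ∃ t, t < w ∧ lv.getD i 0 = pfD gs N (i+t+1)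

-- offset of the first group that does not fit, starting at s (N if all fit)
def stopD (gs : List Int) (N : ℕ) (k : Int) (s : ℕ) : ℕ :=
  (List.range N).findIdx (fun t => decide (k + pfD gs N s < pfD gs N (s+t+1)))

lemma stopD_le (gs : List Int) (N : ℕ) (k : Int) (s : ℕ) : stopD gs N k s ≤ N := by
  simpa using List.findIdx_le_length (xs := List.range N)
    (p := fun t => decide (k + pfD gs N s < pfD gs N (s+t+1)))

lemma stopD_fail (gs : List Int) (N : ℕ) (k : Int) (s u : ℕ) (h : u < stopD gs N k s) :
    pfD gs N (s+u+1) ≤ k + pfD gs N s := by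
  have hu : u < N := lt_of_lt_of_le h (stopD_le gs N k s)
  have := List.not_of_lt_findIdx (p := fun t => decide (k + pfD gs N s < pfD gs N (s+t+1)))
    (xs := List.range N) (i := u) (by simpa [stopD, hu] using h)
  simp only [List.getElem_range] at this
  simpa using of_decide_eq_false this

lemma stopD_hit (gs : List Int) (N : ℕ) (k : Int) (s : ℕ) (h : stopD gs N k s < N) :
    k + pfD gs N s < pfD gs N (s + stopD gs N k s + 1) := by
  have := List.findIdx_getElem (p := fun t => decide (k + pfD gs N s < pfD gs N (s+t+1)))
    (xs := List.range N) (w := by simpa [stopD] using h)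
  simp only [List.getElem_range] at this
  simpa [stopD] using of_decide_eq_true this

lemma stopD_min (gs : List Int) (N : ℕ) (k : Int) (s t : ℕ)
    (h : k + pfD gs N s < pfD gs N (s+t+1)) : stopD gs N k s ≤ t := by
  by_contra hc
  exact absurd (stopD_fail gs N k s t (lt_of_not_ge hc)) (not_le.mpr h)

lemma buildP_spec (gs : List Int) (n : Int) (N : ℕ) (hn : n = (N:Int)) (hN : 1 ≤ N)
    (hlen : N ≤ gs.length) : ∀ j : ℕ, j ≤ 2*N →
    buildP n gs ((List.range (j+1)).map (pfD gs N)) (PySem.List.pyRange (j:Int) (2*n) 1)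
      = some (PlistD gs N) := by
  intro j hj
  induction hd : 2*N - j generalizing j with
  | zero =>
    have hj' : j = 2*N := by omega
    subst hj' hn
    rw [PySem.List.pyRange_one_eq_nil (by push_cast; omega)]
    simp [buildP, PlistD]
  | succ m ih =>
    have hjlt : j < 2*N := by omega
    rw [PySem.List.pyRange_one_cons (by omega : (j:Int) < 2*n)]
    have hjm : j % N < gs.length := lt_of_lt_of_le (Nat.mod_lt _ (by omega)) hlen
    have hmod : PySem.Int.mod (j:Int) n = ((j % N : ℕ) : Int) := by
      subst hn; exact_mod_cast PySem.Int.mod_natCast j N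
    have hget : PySem.List.pyGet? gs (PySem.Int.mod (j:Int) n) = some (gs.getD (j % N) 0) := by
      rw [hmod, PySem.List.pyGet?_natCast, List.getElem?_eq_getElem hjm]
      simp [List.getD, List.getElem?_eq_getElem hjm]
    have hlast : PySem.List.pyGetD ((List.range (j+1)).map (pfD gs N)) (-1) 0 = pfD gs N j := by
      rw [List.range_succ, List.map_append]
      exact PySem.List.pyGetD_neg_one_append_singleton _ _ _
    simp only [buildP, hget, hlast]
    have hacc : (List.range (j+1)).map (pfD gs N) ++ [pfD gs N j + gs.getD (j % N) 0]
        = (List.range (j+1+1)).map (pfD gs N) := by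
      rw [List.range_succ (n := j+1), List.map_append]
      simp [pfD]
    rw [hacc]
    have : ((j:Int) + 1) = ((j+1:ℕ):Int) := by push_cast; ring
    rw [this]
    exact ih (j+1) (by omega) (by omega)

lemma tail_Plist (gs : List Int) (N : ℕ) :
    PySem.List.slice (PlistD gs N) (some 1) none = (List.range (2*N)).map (fun j => pfD gs N (j+1)) := by
  rw [PySem.List.slice_from_one]
  unfold PlistD
  rw [List.range_succ_eq_map]
  simp [List.map_map, Function.comp]

lemma lspec_base (gs : List Int) (N : ℕ) :
    LSpecD gs N 1 (PySem.List.slice (PlistD gs N) (some 1) none) := by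
  rw [tail_Plist]
  constructor
  · simp
  · intro i hi
    have hg : ((List.range (2*N)).map (fun j => pfD gs N (j+1))).getD i 0 = pfD gs N (i+1) :=
      PySem.List.getD_map_range _ _ _ _ (by omega)
    refine ⟨fun t ht => ?_, 0, by omega, by rw [hg]⟩
    interval_cases t
    rw [hg]

lemma lspec_maxLevel (gs : List Int) (N w : ℕ) (prev : List Int) (hw : 1 ≤ w)
    (hlt : w < prev.length) (hs : LSpecD gs N w prev) : LSpecD gs N (2*w) (maxLevel prev w) := by
  obtain ⟨hlen, hval⟩ := hs
  have hgd : ∀ i : ℕ, i < prev.length - w → (maxLevel prev w).getD i 0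
      = max (prev.getD i 0) (prev.getD (i+w) 0) := by
    intro i hi
    have := PySem.List.getD_map_range
      (fun i : ℕ => max (PySem.List.pyGetD prev (i : Int) 0) (PySem.List.pyGetD prev ((i : Int) + (w : Int)) 0))
      (prev.length - w) i 0 hi
    unfold maxLevel
    rw [this]
    have h1 : PySem.List.pyGetD prev (i : Int) 0 = prev.getD i 0 := PySem.List.pyGetD_natCast _ _ _
    have h2 : PySem.List.pyGetD prev ((i : Int) + (w : Int)) 0 = prev.getD (i+w) 0 := by
      rw [show ((i:Int) + (w:Int)) = ((i+w:ℕ):Int) by push_cast; ring]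
      exact PySem.List.pyGetD_natCast _ _ _
    simp only []
    rw [h1, h2]
  constructor
  · unfold maxLevel; simp; omega
  · intro i hi
    have hglt : i < prev.length - w := by omega
    rw [hgd i hglt]
    obtain ⟨hb1, t1, ht1, he1⟩ := hval i (by omega)
    obtain ⟨hb2, t2, ht2, he2⟩ := hval (i+w) (by omega)
    constructor
    · intro t ht
      rcases Nat.lt_or_ge t w with h | h
      · exact le_trans (hb1 t h) (le_max_left _ _)
      · have := hb2 (t - w) (by omega)
        rw [show i + w + (t - w) = i + t by omega] at this
        exact le_trans this (le_max_right _ _)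
    · rcases max_choice (prev.getD i 0) (prev.getD (i+w) 0) with h | h
      · exact ⟨t1, by omega, by rw [h, he1]⟩
      · exact ⟨w + t2, by omega, by rw [h, he2, show i + (w + t2) = i + w + t2 by omega]⟩

lemma buildJmp_spec (gs : List Int) (N : ℕ) : ∀ (fuel : ℕ) (jmp : List (List Int)) (off : ℕ),
    jmp ≠ [] → off = 2^(jmp.length - 1) →
    (∀ l, l < jmp.length → LSpecD gs N (2^l) (jmp.getD l [])) →
    2*N + 2 ≤ fuel + off →
    (buildJmp fuel jmp off) ≠ [] ∧
    (∀ l, l < (buildJmp fuel jmp off).length → LSpecD gs N (2^l) ((buildJmp fuel jmp off).getD l [])) ∧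
    2*N + 1 ≤ 2^(buildJmp fuel jmp off).length := by
  intro fuel
  induction fuel with
  | zero =>
    intro jmp off hne hoff hspec hfuel
    -- impossible: the last level has length + off = 2N+1, so off ≤ 2N+1 < 2N+2 ≤ off
    exfalso
    have hlast := hspec (jmp.length - 1) (by have := List.length_pos_iff.mpr hne; omega)
    have : (jmp.getD (jmp.length - 1) []).length + off = 2*N+1 := by rw [hoff]; exact hlast.1
    omega
  | succ fuel ih =>
    intro jmp off hne hoff hspec hfuel
    have hlp : 0 < jmp.length := List.length_pos_iff.mpr hne
    have hprev : PySem.List.pyGetD jmp (-1) [] = jmp.getD (jmp.length - 1) [] := by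
      rw [PySem.List.pyGetD_neg_one jmp [] hne]
      rw [List.getLast_eq_getElem, List.getD_eq_getElem _ _ (by omega)]
    have hunf : buildJmp (fuel+1) jmp off = if off < (PySem.List.pyGetD jmp (-1) []).length then
        buildJmp fuel (jmp ++ [maxLevel (PySem.List.pyGetD jmp (-1) []) off]) (off*2) else jmp := rfl
    rw [hunf, hprev]
    set prev := jmp.getD (jmp.length - 1) [] with hpdef
    by_cases hc : off < prev.length
    · simp only [if_pos hc]
      have hsp : LSpecD gs N off prev := by
        have := hspec (jmp.length - 1) (by omega)
        rwa [← hoff] at this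
      have hnew : LSpecD gs N (2*off) (maxLevel prev off) :=
        lspec_maxLevel gs N off prev (by rw [hoff]; exact Nat.one_le_two_pow) hc hsp
      refine ih (jmp ++ [maxLevel prev off]) (off*2) (by simp) ?hoff' ?hspec' ?hfuel'
      case hoff' =>
        show off * 2 = 2 ^ ((jmp ++ [maxLevel prev off]).length - 1)
        have hlen2 : (jmp ++ [maxLevel prev off]).length = jmp.length + 1 := by simp
        rw [hlen2, hoff]
        have h3 : jmp.length + 1 - 1 = (jmp.length - 1) + 1 := by omega
        rw [h3, pow_succ]
      case hspec' =>
        intro l hl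
        rw [List.length_append] at hl
        simp only [List.length_cons, List.length_nil] at hl
        rcases Nat.lt_or_ge l jmp.length with h | h
        · rw [List.getD_append _ _ _ _ h]
          exact hspec l h
        · have hleq : l = jmp.length := by omega
          subst hleq
          have : (jmp ++ [maxLevel prev off]).getD jmp.length [] = maxLevel prev off := by
            rw [List.getD_eq_getElem _ _ (by simp)]
            simp
          rw [this]
          have h2 : (2:ℕ)^jmp.length = 2*off := by
            rw [hoff, ← pow_succ']
            congr 1
            omega
          rw [h2]
          exact hnew
      case hfuel' =>
        have hoffpos : 1 ≤ off := by rw [hoff]; exact Nat.one_le_two_pow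
        omega
    · simp only [if_neg hc]
      refine ⟨hne, hspec, ?_⟩
      -- prev.length ≤ off and prev.length + 2^(len-1) = 2N+1
      have hlast := (hspec (jmp.length - 1) (by omega)).1
      have : prev.length + 2^(jmp.length - 1) = 2*N+1 := hlast
      have hoffle : prev.length ≤ off := by omega
      have : 2*N + 1 ≤ 2^(jmp.length - 1) + 2^(jmp.length - 1) := by omega
      calc 2*N+1 ≤ 2^(jmp.length - 1) + 2^(jmp.length-1) := this
        _ = 2^(jmp.length - 1 + 1) := by ring
        _ ≤ 2^jmp.length := Nat.pow_le_pow_right (by norm_num) (by omega)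

lemma descend_step (gs : List Int) (N : ℕ) (k : Int) (s : ℕ) (hs : s < N)
    (jmp : List (List Int)) (l : Int) (W : ℕ) (hW : 1 ≤ W)
    (hspec : LSpecD gs N W (PySem.List.pyGetD jmp l []))
    (pos : ℕ) (hsp : s ≤ pos) (hpm : pos ≤ s + stopD gs N k s)
    (hgap : s + stopD gs N k s < pos + (W + W)) :
    (if ((pos:ℕ):Int) + ((W:ℕ):Int) ≤ ((s+N:ℕ):Int) ∧
        PySem.List.pyGetD (PySem.List.pyGetD jmp l []) ((pos:ℕ):Int) 0 ≤ k + pfD gs N s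
      then ((pos:ℕ):Int) + ((W:ℕ):Int) else ((pos:ℕ):Int))
      = (((pos + if pos + W ≤ s + stopD gs N k s then W else 0 : ℕ)):Int) ∧
    s + stopD gs N k s < (pos + (if pos + W ≤ s + stopD gs N k s then W else 0)) + W ∧
    pos + (if pos + W ≤ s + stopD gs N k s then W else 0) ≤ s + stopD gs N k s := by
  set st := stopD gs N k s with hst
  have hstle : st ≤ N := stopD_le gs N k s
  set lv := PySem.List.pyGetD jmp l [] with hlv
  have hpv : PySem.List.pyGetD lv ((pos:ℕ):Int) 0 = lv.getD pos 0 :=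
    PySem.List.pyGetD_natCast _ _ _
  by_cases hcase : pos + W ≤ s + st
  · -- the jump is taken: every Qf in the block is ≤ thr, and pos+W ≤ s+N
    have hb1 : ((pos:ℕ):Int) + ((W:ℕ):Int) ≤ ((s+N:ℕ):Int) := by push_cast; omega
    have hb2 : lv.getD pos 0 ≤ k + pfD gs N s := by
      obtain ⟨-, t, ht, he⟩ := hspec.2 pos (by omega)
      rw [he]
      have h1 := stopD_fail gs N k s (pos + t - s) (by omega)
      rw [show s + (pos + t - s) = pos + t by omega] at h1
      exact h1
    rw [if_pos ⟨hb1, by rw [hpv]; exact hb2⟩, if_pos hcase]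
    refine ⟨by push_cast; ring, by omega, hcase⟩
  · rw [if_neg ?hnot, if_neg hcase]
    case hnot =>
      rintro ⟨h1, h2⟩
      have h1' : pos + W ≤ s + N := by exact_mod_cast h1
      rw [hpv] at h2
      obtain ⟨hbd, -⟩ := hspec.2 pos (by omega)
      apply hcase
      rcases Nat.lt_or_ge (s + st) (pos + W) with hlt | hge
      · have hstlt : st < N := by omega
        have hhit := stopD_hit gs N k s hstlt
        rw [← hst] at hhit
        have hblock := hbd (s + st - pos) (by omega)
        rw [show pos + (s + st - pos) = s + st by omega] at hblock
        exact absurd (le_trans hblock h2) (not_le.mpr hhit)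
      · exact hge
    refine ⟨by push_cast; ring_nf, ?_, by omega⟩
    -- gap: the stop lies strictly inside pos + W
    rcases Nat.lt_or_ge (s + st) (pos + W) with hlt | hge
    · omega
    · exfalso
      -- block fully below the stop and within the bound ⇒ the if would have been taken
      have h1' : pos + W ≤ s + N := by omega
      obtain ⟨-, t, ht, he⟩ := hspec.2 pos (by omega)
      have h2 := stopD_fail gs N k s (pos + t - s) (by rw [← hst]; omega)
      rw [show s + (pos + t - s) = pos + t by omega] at h2
      -- contradict hcase path: both conditions hold
      exact hcase (by omega) |>.elim

lemma floordiv_pow_two (m : ℕ) : PySem.Int.floordiv (((2^(m+1) : ℕ)):Int) 2 = ((2^m : ℕ) : Int) := by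
  rw [PySem.Int.floordiv_eq_ediv_of_pos (by norm_num)]
  push_cast [pow_succ]
  omega

lemma descend_inv (gs : List Int) (N : ℕ) (k : Int) (s : ℕ) (hs : s < N)
    (jmp : List (List Int))
    (hjs : ∀ l, l < jmp.length → LSpecD gs N (2^l) (jmp.getD l [])) :
    ∀ (l : ℕ), l < jmp.length → ∀ pos : ℕ, s ≤ pos → pos ≤ s + stopD gs N k s →
    s + stopD gs N k s < pos + (2^l + 2^l) →
    descendLoop jmp ((s+N:ℕ):Int) (k + pfD gs N s) (PySem.List.pyRange ((l:ℕ):Int) (-1) (-1))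
      ((pos:ℕ):Int) (((2^l : ℕ)):Int)
      = ((s + stopD gs N k s : ℕ) : Int) := by
  intro l
  induction l with
  | zero =>
    intro hl pos hsp hpm hgap
    rw [show ((0:ℕ):Int) = (0:Int) by norm_num,
      PySem.List.pyRange_neg_one_cons (by norm_num : (-1:Int) < 0),
      PySem.List.pyRange_neg_one_eq_nil (by norm_num : (0:Int) - 1 ≤ -1)]
    have hspec : LSpecD gs N (2^0) (PySem.List.pyGetD jmp ((0:ℕ):Int) []) := by
      rw [PySem.List.pyGetD_natCast]; exact hjs 0 hl
    have hstep := descend_step gs N k s hs jmp ((0:ℕ):Int) (2^0) (by norm_num) hspec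
      pos hsp hpm (by omega)
    simp only [descendLoop]
    rw [show ((0:ℕ):Int) = (0:Int) by norm_num] at hstep
    rw [hstep.1]
    have h2 := hstep.2.1
    have h3 := hstep.2.2
    congr 1
    omega
  | succ l ih =>
    intro hl pos hsp hpm hgap
    have hcons : PySem.List.pyRange ((l+1:ℕ):Int) (-1) (-1)
        = ((l+1:ℕ):Int) :: PySem.List.pyRange ((l:ℕ):Int) (-1) (-1) := by
      rw [PySem.List.pyRange_neg_one_cons (by push_cast; omega)]
      congr 1
      push_cast
      ring
    rw [hcons]
    have hspec : LSpecD gs N (2^(l+1)) (PySem.List.pyGetD jmp ((l+1:ℕ):Int) []) := by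
      rw [PySem.List.pyGetD_natCast]; exact hjs (l+1) hl
    have hstep := descend_step gs N k s hs jmp ((l+1:ℕ):Int) (2^(l+1)) Nat.one_le_two_pow hspec
      pos hsp hpm hgap
    simp only [descendLoop]
    rw [hstep.1, floordiv_pow_two]
    have h2 := hstep.2.1
    have h3 := hstep.2.2
    have hpow : (2:ℕ)^l + 2^l = 2^(l+1) := by rw [pow_succ]; ring
    exact ih (by omega) _ (by omega) h3 (by omega)

lemma rcLoop_spec (gs : List Int) (n : Int) (N : ℕ) (hn : n = (N:Int)) (hN : 1 ≤ N)
    (hlen : N ≤ gs.length) (k : Int) (s : ℕ) (hs : s < N) : ∀ t : ℕ, t ≤ stopD gs N k s →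
    rcLoop gs k (s:Int) n (PySem.List.pyRange (t:Int) n 1) (pfD gs N (s+t) - pfD gs N s)
      = some (if stopD gs N k s < N
          then (pfD gs N (s + stopD gs N k s) - pfD gs N s, (((s + stopD gs N k s) % N : ℕ):Int))
          else (pfD gs N (s + N) - pfD gs N s, (s:Int))) := by
  intro t ht
  have hstle := stopD_le gs N k s
  induction hd : N - t generalizing t with
  | zero =>
    have ht' : t = N := by omega
    have hstN : stopD gs N k s = N := by omega
    subst ht' hn
    rw [PySem.List.pyRange_one_eq_nil (by omega)]
    simp only [rcLoop, hstN]
    rw [if_neg (by omega)]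
  | succ m ih =>
    have htlt : t < N := by omega
    rw [hn, PySem.List.pyRange_one_cons (by exact_mod_cast htlt), ← hn]
    have hmidx : (s + t) % N < gs.length := lt_of_lt_of_le (Nat.mod_lt _ (by omega)) hlen
    have hmod : PySem.Int.mod ((s:Int) + (t:Int)) n = (((s+t) % N : ℕ) : Int) := by
      rw [hn, show ((s:Int) + (t:Int)) = ((s+t:ℕ):Int) by push_cast; ring]
      exact_mod_cast PySem.Int.mod_natCast (s+t) N
    have hget : PySem.List.pyGet? gs (PySem.Int.mod ((s:Int) + (t:Int)) n)
        = some (gs.getD ((s+t) % N) 0) := by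
      rw [hmod, PySem.List.pyGet?_natCast, List.getElem?_eq_getElem hmidx]
      simp [List.getD, List.getElem?_eq_getElem hmidx]
    simp only [rcLoop, hget]
    have hsum : pfD gs N (s+t) - pfD gs N s + gs.getD ((s+t) % N) 0
        = pfD gs N (s+t+1) - pfD gs N s := by
      simp [pfD]
      ring
    by_cases hc : pfD gs N (s+t) - pfD gs N s + gs.getD ((s+t) % N) 0 ≤ k
    · rw [if_pos hc, hsum]
      have hne : t ≠ stopD gs N k s := by
        intro he
        have : stopD gs N k s < N := by omega
        have := stopD_hit gs N k s this
        rw [← he] at this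
        rw [hsum] at hc
        omega
      have : (t:Int) + 1 = ((t+1:ℕ):Int) := by push_cast; ring
      rw [this, show s + t + 1 = s + (t+1) by omega]
      exact ih (t+1) (by omega) (by omega)
    · rw [if_neg hc]
      rw [hsum] at hc
      have hstt : stopD gs N k s = t := by
        have h1 := stopD_min gs N k s t (by omega)
        omega
      rw [if_pos (by omega), hstt, hmod]

lemma pget_Plist (gs : List Int) (N : ℕ) (x : ℕ) (hx : x ≤ 2*N) :
    PySem.List.pyGetD (PlistD gs N) ((x:ℕ):Int) 0 = pfD gs N x := by
  rw [PySem.List.pyGetD_natCast]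
  exact PySem.List.getD_map_range _ _ _ _ (by omega)

lemma stepEq (gs : List Int) (n : Int) (N : ℕ) (hn : n = (N:Int)) (hN : 1 ≤ N)
    (hlen : N ≤ gs.length) (k : Int) (jmp : List (List Int))
    (hjs : ∀ l, l < jmp.length → LSpecD gs N (2^l) (jmp.getD l []))
    (hjL : 2*N + 1 ≤ 2^jmp.length) :
    ∀ s : ℕ, s < N → ∃ res : Int × Int,
      PySem.List.pyGet? (buildTable n k (PlistD gs N) jmp) (s:Int) = some res ∧
      rcSolve n gs k (s:Int) = some res ∧ 0 ≤ res.2 ∧ res.2 < n := by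
  intro s hs
  have hstle := stopD_le gs N k s
  have hL1 : 1 ≤ jmp.length := by
    by_contra h
    have : jmp.length = 0 := by omega
    rw [this] at hjL
    norm_num at hjL
    omega
  -- the table is a map over range n
  have htab : buildTable n k (PlistD gs N) jmp
      = (PySem.List.pyRange 0 n 1).map (fun s =>
        let thr := k + PySem.List.pyGetD (PlistD gs N) s 0
        let pos := descendLoop jmp (s + n) thr
          (PySem.List.pyRange ((jmp.length : Int) - 1) (-1) (-1)) s ((2 : Int) ^ (jmp.length - 1))
        if pos < s + n then
          (PySem.List.pyGetD (PlistD gs N) pos 0 - PySem.List.pyGetD (PlistD gs N) s 0, PySem.Int.mod pos n)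
        else
          (PySem.List.pyGetD (PlistD gs N) (s + n) 0 - PySem.List.pyGetD (PlistD gs N) s 0, s)) := by
    unfold buildTable
    rw [PySem.List.foldl_append_singleton_eq_map]
    simp
  set st := stopD gs N k s with hst
  -- the descent lands on s + st
  have hdesc : descendLoop jmp ((s:Int) + n) (k + PySem.List.pyGetD (PlistD gs N) (s:Int) 0)
      (PySem.List.pyRange ((jmp.length : Int) - 1) (-1) (-1)) (s:Int) ((2 : Int) ^ (jmp.length - 1))
      = ((s + st : ℕ) : Int) := by
    have hb : ((s:Int) + n) = ((s+N:ℕ):Int) := by rw [hn]; push_cast [Nat.cast_add]; ring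
    have hrg : ((jmp.length : Int) - 1) = (((jmp.length - 1 : ℕ):ℕ):Int) := by omega
    have hw : ((2 : Int) ^ (jmp.length - 1)) = (((2^(jmp.length - 1) : ℕ)):Int) := by push_cast; ring
    rw [hb, hrg, hw, pget_Plist gs N s (by omega)]
    have hpow : 2*N + 1 ≤ 2^(jmp.length - 1) + 2^(jmp.length - 1) := by
      have : (2:ℕ)^(jmp.length - 1) + 2^(jmp.length - 1) = 2^(jmp.length - 1 + 1) := by
        rw [pow_succ]; ring
      rw [this]
      calc 2*N+1 ≤ 2^jmp.length := hjL
        _ = 2^(jmp.length - 1 + 1) := by congr 1; omega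
    exact descend_inv gs N k s hs jmp hjs (jmp.length - 1) (by omega) s (le_refl s)
      (by omega) (by omega)
  -- rcSolve lands on the same value
  have hrc := rcLoop_spec gs n N hn hN hlen k s hs 0 (by omega)
  rw [show ((0:ℕ):Int) = (0:Int) by norm_num] at hrc
  rw [show s + 0 = s by omega, sub_self] at hrc
  refine ⟨_, ?_, hrc, ?_, ?_⟩
  · -- table lookup gives the same pair
    rw [htab, PySem.List.pyGet?_natCast]
    rw [hn] at *
    rw [PySem.List.getElem?_map_pyRange_zero _ N s hs]
    simp only []
    rw [hdesc]
    congr 1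
    by_cases hcs : st < N
    · rw [if_pos (by push_cast; omega), if_pos hcs]
      rw [pget_Plist gs N s (by omega), pget_Plist gs N (s+st) (by omega)]
      rw [show (((s+st:ℕ)):Int) = (((s+st:ℕ)):Int) from rfl]
      have : PySem.Int.mod (((s+st:ℕ)):Int) ((N:ℕ):Int) = (((s+st) % N : ℕ):Int) :=
        PySem.Int.mod_natCast _ _
      rw [this]
    · rw [if_neg (by push_cast; omega), if_neg hcs]
      rw [pget_Plist gs N s (by omega)]
      rw [show ((s:Int) + ((N:ℕ):Int)) = (((s+N:ℕ)):Int) by push_cast; ring]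
      rw [pget_Plist gs N (s+N) (by omega)]
  · by_cases hcs : st < N
    · rw [if_pos hcs]; positivity
    · rw [if_neg hcs]; positivity
  · by_cases hcs : st < N
    · rw [if_pos hcs]
      have h9 : (s + st) % N < N := Nat.mod_lt _ (by omega)
      rw [hn]
      show ((((s+st) % N : ℕ)):Int) < ((N:ℕ):Int)
      exact_mod_cast h9
    · rw [if_neg hcs]
      rw [hn]
      show ((s:ℕ):Int) < ((N:ℕ):Int)
      exact_mod_cast hs

lemma loops_eq (gs : List Int) (n r k : Int) (table : List (Int × Int))
    (hstep : ∀ s : ℕ, s < n.toNat → ∃ res : Int × Int,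
      PySem.List.pyGet? table (s:Int) = some res ∧
      rcSolve n gs k (s:Int) = some res ∧ 0 ≤ res.2 ∧ res.2 < n) :
    ∀ (fuel : ℕ) (sb : List (Option (Int × Int))) (rr riders idx : Int) (flag : Bool),
    0 ≤ idx → idx < n →
    solveLoopA r k n gs fuel sb rr riders idx flag = solveLoopB r table fuel sb rr riders idx flag := by
  intro fuel
  induction fuel with
  | zero => intro sb rr riders idx flag h0 h1; rfl
  | succ fuel ih =>
    intro sb rr riders idx flag h0 h1
    have hidx : idx = ((idx.toNat : ℕ) : Int) := by omega
    have hidxlt : idx.toNat < n.toNat := by omega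
    obtain ⟨res, htg, hrg, hr0, hr1⟩ := hstep idx.toNat hidxlt
    rw [← hidx] at htg hrg
    simp only [solveLoopA, solveLoopB]
    by_cases hrr : rr < r
    · rw [if_pos hrr, if_pos hrr]
      cases hsb : PySem.List.pyGet? sb idx with
      | none => rfl
      | some entry =>
        dsimp only
        by_cases hfl : (flag || entry.isNone) = true
        · rw [if_pos hfl, if_pos hfl, htg, hrg]
          exact ih _ _ _ _ _ (by omega) (by omega)
        · rw [if_neg hfl, if_neg hfl]
          cases entry with
          | none => rfl
          | some e0 =>
            dsimp only
            cases hdv : PySem.Int.floordiv? (r - rr) (rr - e0.1) with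
            | none => rfl
            | some numCycles => exact ih _ _ _ _ _ h0 h1
    · rw [if_neg hrr, if_neg hrr]

-- ===== VERDICT (by name: the statement is the Claim_ definition above) =====
theorem solve_spec : Claim_equal_solve := by
  intro inp hdom hpre
  obtain ⟨r, k, n, gs⟩ := inp
  unfold Spec_solve
  unfold Pre_solve at hpre
  dsimp only at hpre
  rcases hpre with hr | ⟨hn1, hnlen⟩
  · -- no rides at all: both return "0"
    have hrt : r.toNat = 0 := by omega
    show solve (r, k, n, gs) = solve_alt (r, k, n, gs)
    unfold solve solve_alt
    simp only [hrt]
    rw [if_pos (by exact hr)]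
    have : solveLoopA r k n gs (0 + 2) (List.replicate n.toNat none) 0 0 0 false = some 0 := by
      simp only [solveLoopA]
      rw [if_neg (by omega)]
    simp only [this]
    rfl
  · -- r > 0 (else the first branch applies) — handle both subcases
    by_cases hr : r ≤ 0
    · have hrt : r.toNat = 0 := by omega
      show solve (r, k, n, gs) = solve_alt (r, k, n, gs)
      unfold solve solve_alt
      simp only [hrt]
      rw [if_pos (by exact hr)]
      have : solveLoopA r k n gs (0 + 2) (List.replicate n.toNat none) 0 0 0 false = some 0 := by
        simp only [solveLoopA]
        rw [if_neg (by omega)]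
      simp only [this]
      rfl
    · set N := n.toNat with hNdef
      have hn : n = (N : Int) := by omega
      have hN : 1 ≤ N := by omega
      have hlen : N ≤ gs.length := by omega
      show solve (r, k, n, gs) = solve_alt (r, k, n, gs)
      unfold solve solve_alt
      rw [if_neg hr]
      simp only []
      -- the prefix list
      have hP0 : ([0] : List Int) = (List.range (0+1)).map (pfD gs N) := by
        simp [pfD]
      have hP : buildP n gs [0] (PySem.List.pyRange 0 (2*n) 1) = some (PlistD gs N) := by
        rw [hP0]
        have h0 : ((0:ℕ):Int) = (0:Int) := by norm_num
        rw [← h0]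
        exact buildP_spec gs n N hn hN hlen 0 (by omega)
      rw [hP]
      simp only []
      -- the sparse table levels
      have hjmp := buildJmp_spec gs N (2*N+2) [PySem.List.slice (PlistD gs N) (some 1) none] 1
        (by simp) (by norm_num)
        (by intro l hl
            simp only [List.length_cons, List.length_nil] at hl
            have hl0 : l = 0 := by omega
            subst hl0
            simpa using lspec_base gs N)
        (by omega)
      obtain ⟨hjne, hjs, hjL⟩ := hjmp
      have hNN : 2*n.toNat + 2 = 2*N+2 := by omega
      rw [hNN]
      set jmp := buildJmp (2*N+2) [PySem.List.slice (PlistD gs N) (some 1) none] 1 with hjdef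
      -- the table agrees with rcSolve
      have hstep := stepEq gs n N hn hN hlen k jmp hjs hjL
      have hstep' : ∀ s : ℕ, s < n.toNat → ∃ res : Int × Int,
          PySem.List.pyGet? (buildTable n k (PlistD gs N) jmp) (s:Int) = some res ∧
          rcSolve n gs k (s:Int) = some res ∧ 0 ≤ res.2 ∧ res.2 < n := by
        intro s hsn
        exact hstep s (by omega)
      have hloop := loops_eq gs n r k (buildTable n k (PlistD gs N) jmp) hstep'
        (r.toNat + 2) (List.replicate n.toNat none) 0 0 0 false (by omega) (by omega)
      rw [← hloop]
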